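-- pv_equiv track=rewrite | github.com/pypi-data/pypi-mirror-403 | packages/proj-flow/proj_flow-0.20.3-py3-none-any.whl/proj_flow/base/matrix.py | partially_matches
-- ===== SOURCE A (Python) =====
-- def partially_matches(tested: dict, test: dict) -> bool:
--     """
--     Checks, if the tested dictionary contains some of the values from test
--     dictionary, with non-zero intersection between both dictionaries.
--
--     :param tested: Dictionary to check
--     :param test: Dictionary to check against
--
--     :returns: `True`, if all keys from `test` are in `tested` and have the same
--         values, `False` otherwise.
--     """
--
--     intersection_size = 0
--     for key, value in test.items():
--         if key not in tested:
--             continue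
--         val = tested.get(key)
--         if val != value:
--             return False
--         intersection_size += 1
--     return intersection_size > 0
-- ===== SOURCE B (Python) =====
-- def partially_matches(tested: dict, test: dict) -> bool:
--     """Sort both item lists by key, then sweep them once with a two-pointer merge:
--     equal keys must carry equal values, and at least one equal key must be seen."""
--     a = sorted(tested.items(), key=lambda p: p[0])
--     b = sorted(test.items(), key=lambda p: p[0])
--     i = j = shared = 0
--     while i < len(a) and j < len(b):
--         (ka, va), (kb, vb) = a[i], b[j]
--         if ka < kb:
--             i += 1
--         elif kb < ka:
--             j += 1
--         else:
--             if va != vb: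
--                 return False
--             shared += 1
--             i += 1
--             j += 1
--     return shared > 0
-- ===== Notes on version B (the rewrite author's own statement) =====
-- stated objective: alternative
-- what changed: Replaces A's hash-membership loop (per-key 'in' test, dict.get, intersection counter) by a sort-then-merge sweep: both item lists are sorted by key and a two-pointer merge finds the shared keys in order, failing on the first value mismatch; correct because the result depends only on the set of shared keys and their value agreement, both order-independent.
import Mathlib
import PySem

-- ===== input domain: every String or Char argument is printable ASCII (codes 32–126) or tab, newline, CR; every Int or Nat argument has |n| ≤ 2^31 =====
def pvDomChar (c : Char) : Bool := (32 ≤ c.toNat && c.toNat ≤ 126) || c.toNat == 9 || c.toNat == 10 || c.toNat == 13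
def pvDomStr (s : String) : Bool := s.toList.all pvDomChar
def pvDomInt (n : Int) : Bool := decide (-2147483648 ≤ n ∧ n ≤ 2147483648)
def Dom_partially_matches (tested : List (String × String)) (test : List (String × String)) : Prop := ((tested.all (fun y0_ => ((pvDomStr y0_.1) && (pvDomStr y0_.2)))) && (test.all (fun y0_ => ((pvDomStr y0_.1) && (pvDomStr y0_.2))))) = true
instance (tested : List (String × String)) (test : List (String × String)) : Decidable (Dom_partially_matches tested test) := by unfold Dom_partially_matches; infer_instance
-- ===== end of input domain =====

-- B replaces A's hash-membership loop with counter by a sort-both-sides two-pointer merge sweep (objective: alternative).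

-- ===== PORT A =====
-- the 'for key, value in test.items(): …' loop carrying the counter, with early return False
def pmLoopA (tested : PySem.Dict String String) : List (String × String) → Int → Bool
  | [], n => decide (n > 0)
  | (key, value) :: rest, n =>
    if ¬ tested.contains key then pmLoopA tested rest n        -- 'if key not in tested: continue'
    else if tested.get? key ≠ some value then false            -- 'val = tested.get(key); if val != value: return False' (key present, so get returns the value)
    else pmLoopA tested rest (n + 1)                           -- 'intersection_size += 1'

def partially_matches (tested : List (String × String)) (test : List (String × String)) : Bool :=
  pmLoopA (PySem.Dict.mk tested) test 0

-- ===== PORT B =====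
-- the 'while i < len(a) and j < len(b): …' two-pointer sweep of Source B, consuming the lists instead of moving indices
def pmMergeB : List (String × String) → List (String × String) → Int → Bool
  | [], _, n => decide (n > 0)
  | _ :: _, [], n => decide (n > 0)
  | (ka, va) :: a, (kb, vb) :: b, n =>
    if ka < kb then pmMergeB a ((kb, vb) :: b) n               -- 'if ka < kb: i += 1'
    else if kb < ka then pmMergeB ((ka, va) :: a) b n          -- 'elif kb < ka: j += 1'
    else if va ≠ vb then false                                 -- 'if va != vb: return False'
    else pmMergeB a b (n + 1)                                  -- 'shared += 1; i += 1; j += 1'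
termination_by a b _ => a.length + b.length

def partially_matches_alt (tested : List (String × String)) (test : List (String × String)) : Bool :=
  pmMergeB (PySem.List.sorted tested (fun p => p.1) false)     -- a = sorted(tested.items(), key=lambda p: p[0])
           (PySem.List.sorted test (fun p => p.1) false)       -- b = sorted(test.items(), key=lambda p: p[0])
           0

-- ===== PRECONDITION & SPEC =====
-- The Python arguments are dicts, whose keys are unique; Pre_ excludes association lists with
-- duplicate keys, which do not represent any Python dict input (the list↔dict correspondence breaks there).
def Pre_partially_matches (tested : List (String × String)) (test : List (String × String)) : Prop :=
  (tested.map Prod.fst).Nodup ∧ (test.map Prod.fst).Nodup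
instance (tested : List (String × String)) (test : List (String × String)) : Decidable (Pre_partially_matches tested test) := by unfold Pre_partially_matches; infer_instance
def pvWitness_partially_matches : (List (String × String)) × (List (String × String)) :=
  ([("a", "1"), ("b", "2")], [("a", "1")])

def Spec_partially_matches (tested : List (String × String)) (test : List (String × String)) (out : Bool) : Prop := out = partially_matches_alt tested test
instance (tested : List (String × String)) (test : List (String × String)) (out : Bool) : Decidable (Spec_partially_matches tested test out) := by unfold Spec_partially_matches; infer_instance

-- ===== CLAIM (what is proved, stated in full; the proofs are below) =====
def Claim_equal_partially_matches : Prop := ∀ (tested : List (String × String)) (test : List (String × String)), Dom_partially_matches tested test → Pre_partially_matches tested test → Spec_partially_matches tested test (partially_matches tested test)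

-- ===== LEMMAS AND PROOFS =====

-- all is determined by the predicate's values on members (used to drop an unmatched head pair)
theorem all_congr_mem {α : Type} (l : List α) (f g : α → Bool) (h : ∀ x ∈ l, f x = g x) :
    l.all f = l.all g := by
  induction l with
  | nil => rfl
  | cons x t ih =>
    simp only [List.all_cons, h x (by simp), ih (fun y hy => h y (by simp [hy]))]

-- characterisation of A's loop: false iff some shared key mismatches, else counter-start + #shared > 0
theorem pmLoopA_eq (tested : PySem.Dict String String) (l : List (String × String)) (n : Int) :
    pmLoopA tested l n =
      (l.all (fun p => !(tested.contains p.1) || (tested.get? p.1 == some p.2)) &&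
        decide (n + (l.countP (fun p => tested.contains p.1) : Int) > 0)) := by
  induction l generalizing n with
  | nil => simp [pmLoopA]
  | cons hd tl ih =>
    obtain ⟨k, v⟩ := hd
    by_cases hc : tested.contains k
    · by_cases hv : tested.get? k = some v
      · simp only [pmLoopA, hv, not_true_eq_false, if_false, ite_not, List.all_cons,
          Bool.not_true, Bool.false_or, beq_self_eq_true, Bool.true_and, List.countP_cons, hc,
          if_pos, ih]
        congr 1
        rw [decide_eq_decide]
        push_cast
        omega
      · simp [pmLoopA, hc, hv]
    · simp [pmLoopA, hc, ih]

-- the sorted item list of a dict-like list has strictly increasing keys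
theorem sorted_keys_lt (l : List (String × String)) (h : (l.map Prod.fst).Nodup) :
    (PySem.List.sorted l (fun p => p.1) false).Pairwise (fun p q => p.1 < q.1) := by
  have hperm : (PySem.List.sorted l (fun p => p.1) false).Perm l :=
    PySem.List.sorted_perm l (fun p => p.1) false
  have hn : ((PySem.List.sorted l (fun p => p.1) false).map Prod.fst).Nodup :=
    ((hperm.map Prod.fst).nodup_iff).mpr h
  have hne : (PySem.List.sorted l (fun p => p.1) false).Pairwise (fun p q => p.1 ≠ q.1) :=
    (List.pairwise_map).mp hn
  have hle : (PySem.List.sorted l (fun p => p.1) false).Pairwise (fun p q => p.1 ≤ q.1) :=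
    PySem.List.sorted_pairwise l (fun p => p.1)
  exact (hle.and hne).imp (fun hpq => lt_of_le_of_ne hpq.1 hpq.2)

-- characterisation of B's merge on strictly key-increasing lists: same shape as A's loop
theorem pmMergeB_eq (a b : List (String × String)) (n : Int)
    (ha : a.Pairwise (fun p q => p.1 < q.1)) (hb : b.Pairwise (fun p q => p.1 < q.1)) :
    pmMergeB a b n =
      ((a.all (fun p => b.all (fun q => !(p.1 == q.1) || (p.2 == q.2)))) &&
        decide (n + (a.countP (fun p => b.any (fun q => q.1 == p.1)) : Int) > 0)) := by
  induction a, b, n using pmMergeB.induct with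
  | case1 b n => simp [pmMergeB]
  | case2 p a n => simp [pmMergeB]
  | case3 ka va a kb vb b n hlt ih =>
    -- ka < kb: ka is below every key of (kb,vb)::b, so it matches nothing there
    have hbelow : ∀ q ∈ (kb, vb) :: b, ka ≠ q.1 := by
      intro q hq
      rcases List.mem_cons.mp hq with hq | hq
      · subst hq; exact ne_of_lt hlt
      · exact ne_of_lt (lt_trans hlt (List.rel_of_pairwise_cons hb hq))
    have h1 : ((kb, vb) :: b).all (fun q => !(ka == q.1) || (va == q.2)) = true := by
      simp only [List.all_eq_true]
      intro q hq
      simp [hbelow q hq]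
    have h2 : ((kb, vb) :: b).any (fun q => q.1 == ka) = false := by
      simp only [List.any_eq_false]
      intro q hq
      simp [(hbelow q hq).symm]
    rw [pmMergeB, if_pos hlt, ih ha.tail hb, List.all_cons, List.countP_cons]
    simp only [h1, h2]
    simp
  | case4 ka va a kb vb b n hnlt hlt ih =>
    -- kb < ka: kb is below every key of (ka,va)::a
    have hbelow : ∀ p ∈ (ka, va) :: a, p.1 ≠ kb := by
      intro p hp
      rcases List.mem_cons.mp hp with hp | hp
      · subst hp; exact (ne_of_lt hlt).symm
      · exact (ne_of_lt (lt_trans hlt (List.rel_of_pairwise_cons ha hp))).symm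
    have hALL : ((ka, va) :: a).all (fun p => ((kb, vb) :: b).all (fun q => !(p.1 == q.1) || (p.2 == q.2))) =
        ((ka, va) :: a).all (fun p => b.all (fun q => !(p.1 == q.1) || (p.2 == q.2))) :=
      all_congr_mem _ _ _ (fun p hp => by
        have h : (p.1 == kb) = false := beq_eq_false_iff_ne.mpr (hbelow p hp)
        simp [List.all_cons, h])
    have hCNT : ((ka, va) :: a).countP (fun p => ((kb, vb) :: b).any (fun q => q.1 == p.1)) =
        ((ka, va) :: a).countP (fun p => b.any (fun q => q.1 == p.1)) :=
      List.countP_congr (fun p hp => by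
        have h : (kb == p.1) = false := beq_eq_false_iff_ne.mpr (Ne.symm (hbelow p hp))
        simp [List.any_cons, h])
    rw [pmMergeB, if_neg hnlt, if_pos hlt, ih ha hb.tail, hALL, hCNT]
  | case5 ka va a kb vb b n hnlt hnlt' hne =>
    -- keys equal, values differ: the pair (ka,va),(kb,vb) falsifies the all
    have hk : ka = kb := le_antisymm (not_lt.mp hnlt') (not_lt.mp hnlt)
    subst hk
    rw [pmMergeB, if_neg hnlt, if_neg hnlt', if_pos hne]
    simp [hne]
  | case6 ka va a kb vb b n hnlt hnlt' hveq ih =>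
    have hk : ka = kb := le_antisymm (not_lt.mp hnlt') (not_lt.mp hnlt)
    have hveq' : va = vb := not_ne_iff.mp hveq
    subst hk; subst hveq'
    -- every later key on either side is above ka, so (ka,va) pairs only with (kb,vb)
    have hagt : ∀ p ∈ a, ka < p.1 := fun p hp => List.rel_of_pairwise_cons ha hp
    have hbgt : ∀ q ∈ b, ka < q.1 := fun q hq => List.rel_of_pairwise_cons hb hq
    have hhead : ((ka, va) :: b).all (fun q => !(ka == q.1) || (va == q.2)) = true := by
      simp only [List.all_cons, List.all_eq_true, Bool.and_eq_true]
      refine ⟨by simp, ?_⟩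
      intro q hq
      have h : (ka == q.1) = false := beq_eq_false_iff_ne.mpr (ne_of_lt (hbgt q hq))
      simp [h]
    have htail : a.all (fun p => ((ka, va) :: b).all (fun q => !(p.1 == q.1) || (p.2 == q.2))) =
        a.all (fun p => b.all (fun q => !(p.1 == q.1) || (p.2 == q.2))) :=
      all_congr_mem _ _ _ (fun p hp => by
        have h : (p.1 == ka) = false := beq_eq_false_iff_ne.mpr (ne_of_lt (hagt p hp)).symm
        simp [List.all_cons, h])
    have hcnt : a.countP (fun p => ((ka, va) :: b).any (fun q => q.1 == p.1)) =
        a.countP (fun p => b.any (fun q => q.1 == p.1)) :=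
      List.countP_congr (fun p hp => by
        have h : (ka == p.1) = false := beq_eq_false_iff_ne.mpr (ne_of_lt (hagt p hp))
        simp [List.any_cons, h])
    have hany : (((ka, va) : String × String) :: b).any (fun q => q.1 == ka) = true := by simp
    rw [pmMergeB, if_neg hnlt, if_neg hnlt', if_neg hveq, ih ha.tail hb.tail,
        List.all_cons, List.countP_cons]
    simp only [hhead, htail, hcnt, hany, Bool.true_and, if_pos]
    congr 1
    rw [decide_eq_decide]
    push_cast
    omega

theorem partially_matches_spec : Claim_equal_partially_matches := by
  intro tested test _hdom hpre
  obtain ⟨hTested, hTest⟩ := hpre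
  unfold Spec_partially_matches partially_matches partially_matches_alt
  rw [pmLoopA_eq, pmMergeB_eq _ _ _ (sorted_keys_lt tested hTested) (sorted_keys_lt test hTest)]
  have hpa : (PySem.List.sorted tested (fun p => p.1) false).Perm tested :=
    PySem.List.sorted_perm tested (fun p => p.1) false
  have hpb : (PySem.List.sorted test (fun p => p.1) false).Perm test :=
    PySem.List.sorted_perm test (fun p => p.1) false
  -- replace the sorted lists by the originals (all/any/countP are permutation-invariant)
  rw [hpa.all_eq, hpa.countP_eq]
  have hinner : tested.all
        (fun p => (PySem.List.sorted test (fun p => p.1) false).all (fun q => !(p.1 == q.1) || (p.2 == q.2))) =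
      tested.all (fun p => test.all (fun q => !(p.1 == q.1) || (p.2 == q.2))) :=
    all_congr_mem _ _ _ (fun p _ => hpb.all_eq)
  have hinner2 : tested.countP
        (fun p => (PySem.List.sorted test (fun p => p.1) false).any (fun q => q.1 == p.1)) =
      tested.countP (fun p => test.any (fun q => q.1 == p.1)) :=
    List.countP_congr (fun p _ => by rw [hpb.any_eq])
  rw [hinner, hinner2]
  -- now both sides range over the original lists; compare componentwise
  rw [Bool.eq_iff_iff]
  simp only [Bool.and_eq_true, List.all_eq_true, decide_eq_true_iff, Bool.or_eq_true,
    Bool.not_eq_true', beq_iff_eq, beq_eq_false_iff_ne, ne_eq]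
  have hcontains : ∀ k, (PySem.Dict.mk tested).contains k = true ↔ ∃ p ∈ tested, p.1 = k := by
    intro k
    rw [PySem.Dict.contains_iff_mem_keys]
    constructor
    · intro h
      obtain ⟨p, hp, hpk⟩ := List.mem_map.mp h
      exact ⟨p, hp, hpk⟩
    · rintro ⟨p, hp, hpk⟩
      exact List.mem_map.mpr ⟨p, hp, hpk⟩
  have hget : ∀ p : String × String, p ∈ tested → (PySem.Dict.mk tested).get? p.1 = some p.2 :=
    fun p hp => PySem.Dict.get?_of_mem_items _ hp hTested
  constructor
  · rintro ⟨hgood, hpos⟩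
    refine ⟨?_, ?_⟩
    · intro p hp q hq
      by_cases hk : p.1 = q.1
      · right
        rcases hgood q hq with h | h
        · exact absurd ((hcontains q.1).mpr ⟨p, hp, hk⟩) (by simp [h])
        · have h2 := hget p hp
          rw [hk, h] at h2
          exact ((Option.some.injEq _ _).mp h2).symm
      · left; exact hk
    · have hcnt : 0 < test.countP (fun p => (PySem.Dict.mk tested).contains p.1) := by
        by_contra h
        simp only [not_lt, Nat.le_zero] at h
        rw [h] at hpos
        omega
      obtain ⟨q, hq, hc⟩ := List.countP_pos_iff.mp hcnt
      obtain ⟨p, hp, hpk⟩ := (hcontains q.1).mp hc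
      have : 0 < tested.countP (fun p => test.any (fun q => q.1 == p.1)) :=
        List.countP_pos_iff.mpr ⟨p, hp, List.any_eq_true.mpr ⟨q, hq, by simp [hpk]⟩⟩
      omega
  · rintro ⟨hgood, hpos⟩
    refine ⟨?_, ?_⟩
    · intro q hq
      by_cases hc : (PySem.Dict.mk tested).contains q.1 = true
      · right
        obtain ⟨p, hp, hpk⟩ := (hcontains q.1).mp hc
        have hv : p.2 = q.2 := (hgood p hp q hq).resolve_left (fun hn => hn hpk)
        rw [show q.1 = p.1 from hpk.symm, hget p hp, hv]
      · left; exact Bool.eq_false_iff.mpr hc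
    · have hcnt : 0 < tested.countP (fun p => test.any (fun q => q.1 == p.1)) := by
        by_contra h
        simp only [not_lt, Nat.le_zero] at h
        rw [h] at hpos
        omega
      obtain ⟨p, hp, hc⟩ := List.countP_pos_iff.mp hcnt
      obtain ⟨q, hq, hqk⟩ := List.any_eq_true.mp hc
      have : 0 < test.countP (fun r => (PySem.Dict.mk tested).contains r.1) :=
        List.countP_pos_iff.mpr ⟨q, hq, (hcontains q.1).mpr ⟨p, hp, by simp at hqk; exact hqk.symm⟩⟩
      omega

-- ===== VERDICT: the theorem above, partially_matches_spec, proves Claim_equal_partially_matches =====
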